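-- pv_equiv track=rewrite | github.com/jramaswami/Binary_Search_Python | sum_of_sublist_range_sum.py | solve
-- ===== SOURCE A (Python) =====
-- import heapq
--
-- def solve(nums, i, j):
--     A = []
--     B = [(n, p, p) for p, n in enumerate(nums)]
--     heapq.heapify(B)
--     while len(A) <= j:
--         # Pop the smallest current sublist sum off the heap.
--         x, l, r = heapq.heappop(B)
--         A.append(x)
--         # Extend right by 1.
--         if r + 1 < len(nums):
--             y = x + nums[r+1]
--             heapq.heappush(B, (y, l, r+1))
--     return sum(A[i:j+1])
-- ===== SOURCE B (Python) =====
-- def solve(nums, i, j):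
--     # Heap replaced by two parallel arrays indexed by sublist start:
--     # cur[l] = sum of the current sublist starting at l, end[l] = its last index
--     # (end[l] == n means start l is exhausted).  Each step picks the argmin by a
--     # linear scan (first smallest start wins ties, matching the heap's tuple order).
--     n = len(nums)
--     cur = list(nums)
--     end = list(range(n))
--     pops = []
--     for _ in range(j + 1):
--         b = -1
--         for l in range(n):
--             if end[l] < n and (b < 0 or cur[l] < cur[b]):
--                 b = l
--         s = cur[b]
--         pops.append(s)
--         end[b] += 1
--         if end[b] < n:
--             cur[b] += nums[end[b]]
--     return sum(pops[i:j+1])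
-- ===== Notes on version B (the rewrite author's own statement) =====
-- stated objective: alternative
-- what changed: The heap of (sum,start,end) candidate triples is replaced by two parallel arrays indexed by sublist start (current sum and current end per start) with a linear argmin scan per step, so heapq disappears entirely; popped sums are accumulated in the same order.
import Mathlib
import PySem

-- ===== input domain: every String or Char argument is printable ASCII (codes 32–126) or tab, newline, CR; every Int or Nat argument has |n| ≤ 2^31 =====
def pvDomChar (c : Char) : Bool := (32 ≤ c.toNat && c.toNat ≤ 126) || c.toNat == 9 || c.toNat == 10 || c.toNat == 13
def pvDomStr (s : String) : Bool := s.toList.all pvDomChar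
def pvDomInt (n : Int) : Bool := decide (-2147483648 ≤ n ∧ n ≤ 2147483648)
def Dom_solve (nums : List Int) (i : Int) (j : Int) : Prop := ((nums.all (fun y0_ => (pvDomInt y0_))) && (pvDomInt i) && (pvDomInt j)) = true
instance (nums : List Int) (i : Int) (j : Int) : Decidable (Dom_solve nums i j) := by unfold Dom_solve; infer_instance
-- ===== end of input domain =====

-- B replaces A's heap of (sum, start, end) triples by two parallel arrays indexed by
-- sublist start with a linear argmin scan per step (objective: alternative).

-- ===== PORT A =====
-- Python tuple comparison (s, l, r) < (s', l', r'): lexicographic.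
def tLt (a b : Int × Int × Int) : Bool :=
  decide (a.1 < b.1 ∨ (a.1 = b.1 ∧ (a.2.1 < b.2.1 ∨ (a.2.1 = b.2.1 ∧ a.2.2 < b.2.2))))

-- heapq modeled by its contract: the heap is the list of its elements, heappop removes
-- a minimal element (exact here: heap elements always have pairwise distinct middle
-- components, so the minimum is unique), heappush appends.
def popMin : List (Int × Int × Int) → Option ((Int × Int × Int) × List (Int × Int × Int))
  | [] => none
  | x :: xs =>
    match popMin xs with
    | none => some (x, [])
    | some (m, rest) => if tLt m x then some (m, x :: rest) else some (x, xs)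

-- while len(A) <= j: exactly (j+1).toNat iterations unless the heap empties first
-- (Python IndexError, excluded by Pre_solve; the port then stops).
def solveLoopA (nums : List Int) : Nat → List Int → List (Int × Int × Int) → List Int
  | 0, acc, _ => acc
  | fuel+1, acc, heap =>
    match popMin heap with
    | none => acc
    | some ((x, _l, r), heap') =>
      let heap'' := if r + 1 < (nums.length : Int)
        then heap' ++ [(x + PySem.List.pyGetD nums (r+1) 0, _l, r + 1)]
        else heap'
      solveLoopA nums fuel (acc ++ [x]) heap''

def solve (nums : List Int) (i : Int) (j : Int) : Int :=
  let B0 := (PySem.List.enumerate nums 0).map (fun pn => (pn.2, pn.1, pn.1))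
  let A := solveLoopA nums (j+1).toNat [] B0
  (PySem.List.slice A (some i) (some (j+1))).sum

-- ===== PORT B =====
-- b = -1; for l in range(n): if end[l] < n and (b < 0 or cur[l] < cur[b]): b = l
def scanB (cur endv : List Int) (n : Int) : Int :=
  (PySem.List.pyRange 0 n 1).foldl
    (fun b l =>
      if PySem.List.pyGetD endv l 0 < n ∧
         (b < 0 ∨ PySem.List.pyGetD cur l 0 < PySem.List.pyGetD cur b 0) then l else b)
    (-1)

-- one iteration of B's main loop over the state (cur, end, pops)
def stepB (nums : List Int) (n : Int) (st : List Int × List Int × List Int) :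
    List Int × List Int × List Int :=
  let b := scanB st.1 st.2.1 n
  let s := PySem.List.pyGetD st.1 b 0
  let pops := st.2.2 ++ [s]
  let endv := PySem.List.pySetD st.2.1 b (PySem.List.pyGetD st.2.1 b 0 + 1)
  let cur := if PySem.List.pyGetD endv b 0 < n
    then PySem.List.pySetD st.1 b (s + PySem.List.pyGetD nums (PySem.List.pyGetD endv b 0) 0)
    else st.1
  (cur, endv, pops)

def solve_alt (nums : List Int) (i : Int) (j : Int) : Int :=
  let n : Int := nums.length
  let st := (PySem.List.pyRange 0 (j+1) 1).foldl (fun st _ => stepB nums n st)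
      (nums, PySem.List.pyRange 0 n 1, [])
  (PySem.List.slice st.2.2 (some i) (some (j+1))).sum

-- ===== PRECONDITION & SPEC =====
-- Python A raises IndexError (heappop from an empty heap) iff j+1 exceeds the number
-- n(n+1)/2 of contiguous sublists; Pre_solve excludes exactly those inputs.
def Pre_solve (nums : List Int) (i : Int) (j : Int) : Prop :=
  2 * j < (nums.length : Int) * ((nums.length : Int) + 1)
instance (nums : List Int) (i : Int) (j : Int) : Decidable (Pre_solve nums i j) := by
  unfold Pre_solve; infer_instance

def pvWitness_solve : List Int × Int × Int := ([1, 2], 0, 1)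

def Spec_solve (nums : List Int) (i : Int) (j : Int) (out : Int) : Prop := out = solve_alt nums i j
instance (nums : List Int) (i : Int) (j : Int) (out : Int) : Decidable (Spec_solve nums i j out) := by unfold Spec_solve; infer_instance

-- ===== CLAIM (what is proved, stated in full; the proofs are below) =====
def Claim_equal_solve : Prop := ∀ (nums : List Int) (i : Int) (j : Int), Dom_solve nums i j → Pre_solve nums i j → Spec_solve nums i j (solve nums i j)

-- ===== LEMMAS AND PROOFS =====

-- the candidate triple contributed by start l (none once start l is exhausted)
def frF (n : Nat) (cur endv : List Int) (l : Nat) : Option (Int × Int × Int) :=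
  if endv.getD l 0 < (n : Int) then some (cur.getD l 0, (l : Int), endv.getD l 0) else none

-- the multiset of candidate triples represented by B's arrays
def fr (n : Nat) (cur endv : List Int) : List (Int × Int × Int) :=
  (List.range n).filterMap (frF n cur endv)

-- number of pops still available
def pot (n : Nat) (endv : List Int) : Nat :=
  ((List.range n).map (fun l => ((n : Int) - endv.getD l 0).toNat)).sum

def InvB (n : Nat) (cur endv : List Int) : Prop :=
  cur.length = n ∧ endv.length = n ∧
  ∀ l : Nat, l < n → 0 ≤ endv.getD l 0 ∧ endv.getD l 0 ≤ (n : Int)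

-- the body of B's scanning loop, named for the proofs
def scanF (cur endv : List Int) (n : Int) (b l : Int) : Int :=
  if PySem.List.pyGetD endv l 0 < n ∧
     (b < 0 ∨ PySem.List.pyGetD cur l 0 < PySem.List.pyGetD cur b 0) then l else b

theorem scanB_eq (cur endv : List Int) (n : Int) :
    scanB cur endv n = (PySem.List.pyRange 0 n 1).foldl (scanF cur endv n) (-1) := rfl

-- ---- list update helpers ----
theorem getD_set_ne' {α : Type} (xs : List α) (i l : Nat) (v d : α) (h : l ≠ i) :
    (xs.set i v).getD l d = xs.getD l d := by
  simp [List.getD_eq_getElem?_getD, List.getElem?_set_ne (Ne.symm h)]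

theorem getD_set_self' {α : Type} (xs : List α) (i : Nat) (v d : α) (h : i < xs.length) :
    (xs.set i v).getD i d = v := by
  simp [List.getD_eq_getElem?_getD, List.getElem?_set_self, h]

theorem filterMap_eq_map_of {α : Type} (L : List Nat) (g : Nat → Option α) (h : Nat → α)
    (H : ∀ l ∈ L, g l = some (h l)) : L.filterMap g = L.map h := by
  induction L with
  | nil => rfl
  | cons x t ih =>
    rw [List.filterMap_cons_some (H x (by simp)), List.map_cons,
      ih (fun l hl => H l (by simp [hl]))]

-- ---- order facts ----
theorem tLt_irrefl (a : Int × Int × Int) : tLt a a = false := by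
  simp [tLt]

theorem tLt_asymm {a b : Int × Int × Int} (h : tLt a b = true) : tLt b a = false := by
  obtain ⟨a1, a2, a3⟩ := a; obtain ⟨b1, b2, b3⟩ := b
  simp only [tLt, decide_eq_true_eq, decide_eq_false_iff_not] at h ⊢; omega

theorem tLt_total {a b : Int × Int × Int} (h : a ≠ b) : tLt a b = true ∨ tLt b a = true := by
  obtain ⟨a1, a2, a3⟩ := a; obtain ⟨b1, b2, b3⟩ := b
  simp only [tLt, decide_eq_true_eq]
  by_contra hc
  push_neg at hc
  exact h (by simp only [Prod.mk.injEq]; omega)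

theorem tLe_trans {a b c : Int × Int × Int} (h1 : tLt b a = false) (h2 : tLt c b = false) :
    tLt c a = false := by
  obtain ⟨a1, a2, a3⟩ := a; obtain ⟨b1, b2, b3⟩ := b; obtain ⟨c1, c2, c3⟩ := c
  simp only [tLt, decide_eq_false_iff_not] at h1 h2 ⊢; omega

-- ---- popMin ----
theorem popMin_spec : ∀ (xs : List (Int × Int × Int)), xs ≠ [] →
    ∃ m ys, popMin xs = some (m, ys) ∧ (m :: ys).Perm xs ∧ ∀ x ∈ xs, tLt x m = false := by
  intro xs
  induction xs with
  | nil => intro h; exact absurd rfl h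
  | cons x rest ih =>
    intro _
    by_cases hre : rest = []
    · subst hre
      refine ⟨x, [], by simp [popMin], by simp, ?_⟩
      intro z hz; rcases List.mem_singleton.mp hz with rfl; exact tLt_irrefl z
    · obtain ⟨m, ys, hpm, hperm, hmin⟩ := ih hre
      by_cases hlt : tLt m x = true
      · refine ⟨m, x :: ys, ?_, ?_, ?_⟩
        · simp [popMin, hpm, hlt]
        · exact (List.Perm.swap x m ys).trans (hperm.cons x)
        · intro z hz
          rcases List.mem_cons.mp hz with rfl | hz'
          · exact tLt_asymm hlt
          · exact hmin z hz'
      · refine ⟨x, rest, ?_, List.Perm.refl _, ?_⟩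
        · simp [popMin, hpm, hlt]
        · intro z hz
          rcases List.mem_cons.mp hz with rfl | hz'
          · exact tLt_irrefl z
          · exact tLe_trans (Bool.eq_false_iff.mpr hlt) (hmin z hz')

-- ---- scanB ----
theorem scan_aux (cur endv : List Int) (n : Nat) : ∀ (m : Nat), m ≤ n →
    ((PySem.List.pyRange 0 (m : Int) 1).foldl (scanF cur endv (n : Int)) (-1) = -1 ∧
      ∀ l : Nat, l < m → ¬ endv.getD l 0 < (n : Int)) ∨
    (∃ b : Nat,
      (PySem.List.pyRange 0 (m : Int) 1).foldl (scanF cur endv (n : Int)) (-1) = (b : Int) ∧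
      b < m ∧ endv.getD b 0 < (n : Int) ∧
      ∀ l : Nat, l < m → endv.getD l 0 < (n : Int) →
        cur.getD b 0 < cur.getD l 0 ∨ (cur.getD b 0 = cur.getD l 0 ∧ b ≤ l)) := by
  intro m
  induction m with
  | zero =>
    intro _
    left
    refine ⟨?_, by omega⟩
    rw [PySem.List.pyRange_one_eq_nil (by omega)]; rfl
  | succ m ih =>
    intro hm
    have hrange : PySem.List.pyRange 0 ((m + 1 : Nat) : Int) 1 =
        PySem.List.pyRange 0 (m : Int) 1 ++ [(m : Int)] := by
      push_cast
      exact PySem.List.pyRange_one_succ_right (by positivity)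
    rw [hrange, List.foldl_append]
    rcases ih (by omega) with ⟨h1, h2⟩ | ⟨b, hb, hbm, hact, hbest⟩
    · rw [h1]
      by_cases ha : endv.getD m 0 < (n : Int)
      · right
        refine ⟨m, ?_, by omega, ha, ?_⟩
        · simp only [List.foldl_cons, List.foldl_nil, scanF, PySem.List.pyGetD_natCast]
          rw [if_pos ⟨ha, Or.inl (by norm_num)⟩]
        · intro l hl hactl
          have hlm : l = m := by
            rcases Nat.lt_succ_iff_lt_or_eq.mp hl with h | h
            · exact absurd hactl (h2 l h)
            · exact h
          subst hlm; right; exact ⟨rfl, le_refl _⟩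
      · left
        refine ⟨?_, ?_⟩
        · simp only [List.foldl_cons, List.foldl_nil, scanF, PySem.List.pyGetD_natCast]
          rw [if_neg (fun h => ha h.1)]
        intro l hl
        rcases Nat.lt_succ_iff_lt_or_eq.mp hl with h | h
        · exact h2 l h
        · subst h; exact ha
    · rw [hb]
      simp only [List.foldl_cons, List.foldl_nil, scanF, PySem.List.pyGetD_natCast]
      have hbneg : ¬ ((b : Int) < 0) := by omega
      by_cases hc : endv.getD m 0 < (n : Int) ∧ cur.getD m 0 < cur.getD b 0
      · right
        refine ⟨m, ?_, by omega, hc.1, ?_⟩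
        · rw [if_pos ⟨hc.1, Or.inr hc.2⟩]
        · intro l hl hactl
          rcases Nat.lt_succ_iff_lt_or_eq.mp hl with h | h
          · rcases hbest l h hactl with h' | h'
            · left; omega
            · left; omega
          · subst h; right; exact ⟨rfl, le_refl _⟩
      · right
        refine ⟨b, ?_, by omega, hact, ?_⟩
        · rw [if_neg (fun h => hc ⟨h.1, h.2.resolve_left hbneg⟩)]
        · intro l hl hactl
          rcases Nat.lt_succ_iff_lt_or_eq.mp hl with h | h
          · exact hbest l h hactl
          · rw [h] at hactl ⊢
            have hnc : ¬ cur.getD m 0 < cur.getD b 0 := fun hh => hc ⟨hactl, hh⟩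
            rcases lt_or_ge (cur.getD b 0) (cur.getD m 0) with h' | h'
            · left; exact h'
            · right; exact ⟨by omega, by omega⟩

theorem scan_spec (cur endv : List Int) (n : Nat)
    (hex : ∃ l : Nat, l < n ∧ endv.getD l 0 < (n : Int)) :
    ∃ b : Nat, scanB cur endv (n : Int) = (b : Int) ∧ b < n ∧ endv.getD b 0 < (n : Int) ∧
      ∀ l : Nat, l < n → endv.getD l 0 < (n : Int) →
        cur.getD b 0 < cur.getD l 0 ∨ (cur.getD b 0 = cur.getD l 0 ∧ b ≤ l) := by
  rw [scanB_eq]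
  rcases scan_aux cur endv n n (le_refl n) with ⟨_, h2⟩ | ⟨b, hb, hbm, hact, hbest⟩
  · obtain ⟨l, hl, hactl⟩ := hex
    exact absurd hactl (h2 l hl)
  · exact ⟨b, hb, hbm, hact, hbest⟩

-- ---- range decomposition ----
theorem range_split (b n : Nat) (h : b < n) :
    List.range n = List.range b ++ b :: (List.range (n - b - 1)).map (fun t => b + 1 + t) := by
  have hn : n = b + (1 + (n - b - 1)) := by omega
  rw [hn, List.range_add, List.range_add]
  simp [List.map_map, Function.comp_def, Nat.add_assoc]

theorem mem_fr {n : Nat} {cur endv : List Int} {x : Int × Int × Int} (hx : x ∈ fr n cur endv) :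
    ∃ l : Nat, l < n ∧ endv.getD l 0 < (n : Int) ∧
      x = (cur.getD l 0, (l : Int), endv.getD l 0) := by
  obtain ⟨l, hl, hf⟩ := List.mem_filterMap.mp hx
  by_cases ha : endv.getD l 0 < (n : Int)
  · rw [frF, if_pos ha] at hf
    exact ⟨l, List.mem_range.mp hl, ha, (Option.some.inj hf).symm⟩
  · rw [frF, if_neg ha] at hf; exact absurd hf (by simp)

theorem fr_step (n : Nat) (cur endv : List Int) (b : Nat) (v : Int)
    (hb : b < n) (hlc : cur.length = n) (hle : endv.length = n)
    (hact : endv.getD b 0 < (n : Int)) :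
    (fr n (if endv.getD b 0 + 1 < (n : Int) then cur.set b (cur.getD b 0 + v) else cur)
        (endv.set b (endv.getD b 0 + 1))).Perm
      (((fr n cur endv).erase (cur.getD b 0, (b : Int), endv.getD b 0)) ++
        (if endv.getD b 0 + 1 < (n : Int)
          then [(cur.getD b 0 + v, (b : Int), endv.getD b 0 + 1)] else [])) := by
  set e := endv.getD b 0 with he
  set cur' := if e + 1 < (n : Int) then cur.set b (cur.getD b 0 + v) else cur with hcur'
  set endv' := endv.set b (e + 1) with hendv'
  have hc'ne : ∀ l : Nat, l ≠ b → cur'.getD l 0 = cur.getD l 0 := by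
    intro l hl; rw [hcur']; split_ifs
    · exact getD_set_ne' _ _ _ _ _ hl
    · rfl
  have he'ne : ∀ l : Nat, l ≠ b → endv'.getD l 0 = endv.getD l 0 := by
    intro l hl; rw [hendv']; exact getD_set_ne' _ _ _ _ _ hl
  have he'b : endv'.getD b 0 = e + 1 := by
    rw [hendv']; exact getD_set_self' _ _ _ _ (hle ▸ hb)
  have hcongrL : List.filterMap (frF n cur' endv') (List.range b) =
      List.filterMap (frF n cur endv) (List.range b) := by
    apply List.filterMap_congr; intro l hl
    have hlb : l ≠ b := by have := List.mem_range.mp hl; omega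
    simp only [frF, hc'ne l hlb, he'ne l hlb]
  have hcongrR : List.filterMap (frF n cur' endv')
        ((List.range (n - b - 1)).map (fun t => b + 1 + t)) =
      List.filterMap (frF n cur endv) ((List.range (n - b - 1)).map (fun t => b + 1 + t)) := by
    apply List.filterMap_congr; intro l hl
    obtain ⟨t, _, rfl⟩ := List.mem_map.mp hl
    have hlb : b + 1 + t ≠ b := by omega
    simp only [frF, hc'ne _ hlb, he'ne _ hlb]
  have hfb : frF n cur endv b = some (cur.getD b 0, (b : Int), e) := by
    rw [frF, if_pos hact]
  have htb_notinL : (cur.getD b 0, (b : Int), e) ∉ List.filterMap (frF n cur endv) (List.range b) := by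
    intro hmem
    obtain ⟨l, hl, hfl⟩ := List.mem_filterMap.mp hmem
    have hlb := List.mem_range.mp hl
    by_cases ha : endv.getD l 0 < (n : Int)
    · rw [frF, if_pos ha] at hfl
      have h2 : ((l : Int)) = (b : Int) := congrArg (fun p => p.2.1) (Option.some.inj hfl)
      omega
    · rw [frF, if_neg ha] at hfl; exact absurd hfl (by simp)
  have h1 : fr n cur endv = List.filterMap (frF n cur endv) (List.range b) ++
      (cur.getD b 0, (b : Int), e) :: List.filterMap (frF n cur endv)
        ((List.range (n - b - 1)).map (fun t => b + 1 + t)) := by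
    rw [fr, range_split b n hb, List.filterMap_append, List.filterMap_cons_some hfb]
  rw [h1, List.erase_append_right _ htb_notinL, List.erase_cons_head]
  by_cases hcase : e + 1 < (n : Int)
  · have hfb' : frF n cur' endv' b = some (cur.getD b 0 + v, (b : Int), e + 1) := by
      rw [frF, he'b, if_pos hcase, hcur', if_pos hcase]
      rw [getD_set_self' _ _ _ _ (hlc ▸ hb)]
    have h2 : fr n cur' endv' = List.filterMap (frF n cur endv) (List.range b) ++
        (cur.getD b 0 + v, (b : Int), e + 1) :: List.filterMap (frF n cur endv)
          ((List.range (n - b - 1)).map (fun t => b + 1 + t)) := by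
      rw [fr, range_split b n hb, List.filterMap_append, List.filterMap_cons_some hfb',
        hcongrL, hcongrR]
    rw [h2, if_pos hcase]
    refine List.Perm.trans (List.Perm.append_left _ ?_) (by rw [← List.append_assoc])
    exact List.perm_append_comm (l₁ := [(cur.getD b 0 + v, (b : Int), e + 1)])
  · have hfb' : frF n cur' endv' b = none := by
      rw [frF, he'b, if_neg hcase]
    have h2 : fr n cur' endv' = List.filterMap (frF n cur endv) (List.range b) ++
        List.filterMap (frF n cur endv)
          ((List.range (n - b - 1)).map (fun t => b + 1 + t)) := by
      rw [fr, range_split b n hb, List.filterMap_append, List.filterMap_cons_none hfb',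
        hcongrL, hcongrR]
    rw [h2, if_neg hcase, List.append_nil]

theorem pot_step (n : Nat) (endv : List Int) (b : Nat)
    (hb : b < n) (hle : endv.length = n) (hact : endv.getD b 0 < (n : Int)) :
    pot n (endv.set b (endv.getD b 0 + 1)) + 1 = pot n endv := by
  rw [pot, pot, range_split b n hb]
  simp only [List.map_append, List.sum_append, List.map_cons, List.sum_cons]
  have hL : (List.range b).map
        (fun l => ((n : Int) - (endv.set b (endv.getD b 0 + 1)).getD l 0).toNat) =
      (List.range b).map (fun l => ((n : Int) - endv.getD l 0).toNat) := by
    apply List.map_congr_left; intro l hl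
    rw [getD_set_ne' _ _ _ _ _ (by have := List.mem_range.mp hl; omega)]
  have hR : ((List.range (n - b - 1)).map (fun t => b + 1 + t)).map
        (fun l => ((n : Int) - (endv.set b (endv.getD b 0 + 1)).getD l 0).toNat) =
      ((List.range (n - b - 1)).map (fun t => b + 1 + t)).map
        (fun l => ((n : Int) - endv.getD l 0).toNat) := by
    apply List.map_congr_left; intro l hl
    obtain ⟨t, _, rfl⟩ := List.mem_map.mp hl
    rw [getD_set_ne' _ _ _ _ _ (by omega)]
  rw [hL, hR, getD_set_self' _ _ _ _ (hle ▸ hb)]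
  omega

-- ---- the simulation ----
theorem sim (nums : List Int) : ∀ (k : Nat) (cur endv : List Int)
    (H : List (Int × Int × Int)) (pops : List Int),
    InvB nums.length cur endv → H.Perm (fr nums.length cur endv) →
    k ≤ pot nums.length endv →
    solveLoopA nums k pops H =
      ((stepB nums (nums.length : Int))^[k] (cur, endv, pops)).2.2 := by
  intro k
  induction k with
  | zero => intro cur endv H pops _ _ _; rfl
  | succ k ih =>
    intro cur endv H pops hinv hH hk
    obtain ⟨hlc, hle, hbnd⟩ := hinv
    have hex : ∃ l : Nat, l < nums.length ∧ endv.getD l 0 < (nums.length : Int) := by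
      by_contra hc
      push_neg at hc
      have hz : pot nums.length endv = 0 := by
        apply List.sum_eq_zero
        intro x hx
        obtain ⟨l, hl, rfl⟩ := List.mem_map.mp hx
        have := hc l (List.mem_range.mp hl)
        omega
      omega
    obtain ⟨bN, hscan, hbn, hactb, hbest⟩ := scan_spec cur endv nums.length hex
    have htb_fr : (cur.getD bN 0, (bN : Int), endv.getD bN 0) ∈ fr nums.length cur endv := by
      apply List.mem_filterMap.mpr
      exact ⟨bN, List.mem_range.mpr hbn, by rw [frF, if_pos hactb]⟩
    have hHne : H ≠ [] := by
      intro h0; rw [h0] at hH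
      exact absurd ((hH.symm.mem_iff).mp htb_fr) (by simp)
    obtain ⟨m, ys, hpm, hperm, hmin⟩ := popMin_spec H hHne
    have hmH : m ∈ H := (hperm.mem_iff).mp (by simp)
    have hmfr : m ∈ fr nums.length cur endv := (hH.mem_iff).mp hmH
    obtain ⟨lN, hlN, hactl, hmeq⟩ := mem_fr hmfr
    have htbH : (cur.getD bN 0, (bN : Int), endv.getD bN 0) ∈ H := (hH.mem_iff).mpr htb_fr
    have h1 : tLt (cur.getD bN 0, (bN : Int), endv.getD bN 0) m = false := hmin _ htbH
    have hmtb : m = (cur.getD bN 0, (bN : Int), endv.getD bN 0) := by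
      by_cases hlb : lN = bN
      · rw [hmeq, hlb]
      · have hne : (lN : Int) ≠ (bN : Int) := by exact_mod_cast hlb
        have h2 : tLt m (cur.getD bN 0, (bN : Int), endv.getD bN 0) = false := by
          rw [hmeq]
          simp only [tLt, decide_eq_false_iff_not]
          rcases hbest lN hlN hactl with hlt | ⟨heq, hle'⟩
          · omega
          · omega
        by_contra hne'
        rcases tLt_total hne' with h | h
        · rw [h2] at h; exact Bool.false_ne_true h
        · rw [h1] at h; exact Bool.false_ne_true h
    subst hmtb
    -- unfold one step of A
    have hstepA : solveLoopA nums (k+1) pops H =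
        solveLoopA nums k (pops ++ [cur.getD bN 0])
          (if endv.getD bN 0 + 1 < (nums.length : Int)
            then ys ++ [(cur.getD bN 0 + PySem.List.pyGetD nums (endv.getD bN 0 + 1) 0,
              (bN : Int), endv.getD bN 0 + 1)]
            else ys) := by
      simp only [solveLoopA, hpm]
    -- unfold one step of B
    have hstepB : stepB nums (nums.length : Int) (cur, endv, pops) =
        ((if endv.getD bN 0 + 1 < (nums.length : Int)
            then cur.set bN (cur.getD bN 0 + PySem.List.pyGetD nums (endv.getD bN 0 + 1) 0)
            else cur),
          endv.set bN (endv.getD bN 0 + 1), pops ++ [cur.getD bN 0]) := by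
      simp only [stepB, hscan, PySem.List.pyGetD_natCast, PySem.List.pySetD_natCast]
      rw [getD_set_self' _ _ _ _ (hle ▸ hbn)]
    rw [hstepA, Function.iterate_succ_apply, hstepB]
    apply ih
    · refine ⟨?_, ?_, ?_⟩
      · split_ifs with h
        · rw [List.length_set]; exact hlc
        · exact hlc
      · rw [List.length_set]; exact hle
      · intro l hl
        by_cases hlb : l = bN
        · subst hlb
          rw [getD_set_self' _ _ _ _ (hle ▸ hl)]
          have := hbnd l hl
          omega
        · rw [getD_set_ne' _ _ _ _ _ hlb]
          exact hbnd l hl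
    · have hys : ys.Perm ((fr nums.length cur endv).erase
          (cur.getD bN 0, (bN : Int), endv.getD bN 0)) :=
        ((hperm.trans hH).trans (List.perm_cons_erase htb_fr)).cons_inv
      have hfs := fr_step nums.length cur endv bN
        (PySem.List.pyGetD nums (endv.getD bN 0 + 1) 0) hbn hlc hle hactb
      by_cases hcase : endv.getD bN 0 + 1 < (nums.length : Int)
      · simp only [if_pos hcase] at hfs ⊢
        exact ((hys.append_right _).trans hfs.symm)
      · simp only [if_neg hcase] at hfs ⊢
        rw [List.append_nil] at hfs
        exact hys.trans hfs.symm
    · have := pot_step nums.length endv bN hbn hle hactb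
      omega

-- ---- the initial state ----
theorem init_heap (nums : List Int) :
    ((PySem.List.enumerate nums 0).map (fun pn => (pn.2, pn.1, pn.1))) =
      fr nums.length nums (PySem.List.pyRange 0 (nums.length : Int) 1) := by
  rw [PySem.List.enumerate_eq_map_pyRange nums 0, fr]
  rw [show PySem.List.len nums = (nums.length : Int) from by simp [PySem.List.len_eq]]
  rw [PySem.List.pyRange_zero_nat, List.map_map, List.map_map]
  symm
  apply filterMap_eq_map_of
  intro l hl
  have hln := List.mem_range.mp hl
  simp only [frF, Function.comp_apply]
  rw [PySem.List.getD_map_range _ _ _ _ hln]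
  rw [if_pos (by exact_mod_cast hln)]
  simp [PySem.List.pyGetD_natCast]

theorem init_inv (nums : List Int) :
    InvB nums.length nums (PySem.List.pyRange 0 (nums.length : Int) 1) := by
  refine ⟨rfl, ?_, ?_⟩
  · rw [PySem.List.length_pyRange_one]; omega
  · intro l hl
    rw [PySem.List.pyRange_zero_nat, PySem.List.getD_map_range _ _ _ _ hl]
    constructor
    · positivity
    · exact_mod_cast le_of_lt hl

theorem sum_map_succ (L : List Nat) (f : Nat → Nat) :
    (L.map (fun x => f x + 1)).sum = (L.map f).sum + L.length := by
  induction L with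
  | nil => rfl
  | cons x t ih => simp only [List.map_cons, List.sum_cons, List.length_cons, ih]; omega

theorem gsum : ∀ n : Nat, 2 * ((List.range n).map (fun l => n - l)).sum = n * (n + 1) := by
  intro n
  induction n with
  | zero => simp
  | succ n ih =>
    rw [List.range_succ, List.map_append, List.sum_append]
    have hcongr : (List.range n).map (fun l => n + 1 - l) =
        (List.range n).map (fun l => (n - l) + 1) := by
      apply List.map_congr_left; intro l hl
      have := List.mem_range.mp hl; omega
    rw [hcongr, sum_map_succ, List.length_range]
    simp only [List.map_cons, List.map_nil, List.sum_cons, List.sum_nil]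
    have hr : (n + 1) * (n + 1 + 1) = n * (n + 1) + 2 * n + 2 := by ring
    rw [hr]
    have ihe : ((List.range n).map (HSub.hSub n)).sum =
        ((List.range n).map (fun l => n - l)).sum := rfl
    omega

theorem init_pot (nums : List Int) :
    2 * pot nums.length (PySem.List.pyRange 0 (nums.length : Int) 1) =
      nums.length * (nums.length + 1) := by
  rw [pot]
  have h1 : (List.range nums.length).map
        (fun l => ((nums.length : Int) -
          (PySem.List.pyRange 0 (nums.length : Int) 1).getD l 0).toNat) =
      (List.range nums.length).map (fun l => nums.length - l) := by
    apply List.map_congr_left; intro l hl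
    have hln := List.mem_range.mp hl
    rw [PySem.List.pyRange_zero_nat, PySem.List.getD_map_range _ _ _ _ hln]
    omega
  rw [h1, gsum nums.length]

theorem foldl_const_iterate {α β : Type} (f : α → α) (L : List β) (a : α) :
    L.foldl (fun s _ => f s) a = f^[L.length] a := by
  induction L generalizing a with
  | nil => rfl
  | cons x t ih => simp [List.foldl_cons, ih, Function.iterate_succ_apply]

-- ===== VERDICT (by name: the statement is the Claim_ definition above) =====
theorem solve_spec : Claim_equal_solve := by
  intro nums i j _ hpre
  unfold Spec_solve solve solve_alt
  simp only [foldl_const_iterate, PySem.List.length_pyRange_one, Int.sub_zero]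
  rw [sim nums (j+1).toNat nums (PySem.List.pyRange 0 (nums.length : Int) 1)
    ((PySem.List.enumerate nums 0).map (fun pn => (pn.2, pn.1, pn.1))) []
    (init_inv nums)
    (by rw [init_heap nums])
    (by
      have h2 := init_pot nums
      unfold Pre_solve at hpre
      rw [show (nums.length : Int) * ((nums.length : Int) + 1) =
          ((nums.length * (nums.length + 1) : Nat) : Int) from by push_cast; ring] at hpre
      omega)]
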